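-- pv_equiv track=rewrite | github.com/flagboy/haihu-generator | src/training/augmentation/unified_augmentor.py | _get_class_id
-- ===== SOURCE A (Python) =====
-- def _get_class_id(class_name: str) -> int:
--     """クラス名からクラスIDを取得"""
--     all_classes = []
--     for suit in ["m", "p", "s"]:
--         for num in range(1, 10):
--             all_classes.append(f"{num}{suit}")
--     all_classes.extend(["1z", "2z", "3z", "4z", "5z", "6z", "7z"])
--     all_classes.extend(["0m", "0p", "0s"])
--     all_classes.append("back")
--
--     try:
--         return all_classes.index(class_name)
--     except ValueError:
--         return 0
-- ===== SOURCE B (Python) =====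
-- def _get_class_id(class_name: str) -> int:
--     """クラス名からクラスIDを取得 (closed-form parse, no list built)"""
--     if class_name == "back":
--         return 37
--     if len(class_name) != 2:
--         return 0
--     d, s = class_name[0], class_name[1]
--     if s in "mps":
--         suit_off = "mps".index(s)
--         if d == "0":
--             return 34 + suit_off
--         if d in "123456789":
--             return suit_off * 9 + int(d) - 1
--     elif s == "z" and d in "1234567":
--         return 26 + int(d)
--     return 0
-- ===== Notes on version B (the rewrite author's own statement) =====
-- stated objective: simpler
-- what changed: B parses the tile name directly (suit letter -> offset, digit -> value, special cases '0x' and 'back') instead of building the 38-element class list and scanning it with .index(); no list is ever built.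
import Mathlib
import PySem

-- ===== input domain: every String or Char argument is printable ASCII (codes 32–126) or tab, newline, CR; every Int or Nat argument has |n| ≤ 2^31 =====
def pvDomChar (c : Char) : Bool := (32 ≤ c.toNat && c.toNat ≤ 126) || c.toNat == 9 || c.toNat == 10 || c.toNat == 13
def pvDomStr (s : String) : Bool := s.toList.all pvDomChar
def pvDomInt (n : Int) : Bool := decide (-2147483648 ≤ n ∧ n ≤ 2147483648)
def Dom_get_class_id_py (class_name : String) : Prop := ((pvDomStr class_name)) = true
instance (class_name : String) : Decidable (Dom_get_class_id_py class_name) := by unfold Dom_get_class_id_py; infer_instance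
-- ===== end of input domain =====

-- B replaces A's build-a-38-element-list-then-.index() scan by a direct closed-form parse
-- of the two-character tile name (suit offset + digit) with explicit guarded branches.

-- ===== PORT A =====
def get_class_id_py (class_name : String) : Int :=
  let all_classes : List String :=
    ["m", "p", "s"].foldl (fun acc suit =>
      (PySem.List.pyRange 1 10 1).foldl
        (fun acc num => acc ++ [PySem.Int.toStr num ++ suit]) acc) []
  let all_classes := all_classes ++ ["1z", "2z", "3z", "4z", "5z", "6z", "7z"]
  let all_classes := all_classes ++ ["0m", "0p", "0s"]
  let all_classes := all_classes ++ ["back"]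
  match PySem.List.index? all_classes class_name with
  | some i => (i : Int)   -- list.index(class_name)
  | none => 0             -- except ValueError: return 0

-- ===== PORT B =====
def get_class_id_py_alt (class_name : String) : Int :=
  if class_name = "back" then 37
  else
    match class_name.toList with
    | [d, s] =>
      if s ∈ ['m', 'p', 's'] then
        let suit_off : Int := if s = 'm' then 0 else if s = 'p' then 1 else 2
        if d = '0' then 34 + suit_off
        else if d ∈ ['1', '2', '3', '4', '5', '6', '7', '8', '9'] then
          suit_off * 9 + ((d.toNat : Int) - 48) - 1   -- int(d)
        else 0
      else if s = 'z' ∧ d ∈ ['1', '2', '3', '4', '5', '6', '7'] then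
        26 + ((d.toNat : Int) - 48)                   -- int(d)
      else 0
    | _ => 0

-- ===== PRECONDITION & SPEC =====
def Spec_get_class_id_py (class_name : String) (out : Int) : Prop := out = get_class_id_py_alt class_name
instance (class_name : String) (out : Int) : Decidable (Spec_get_class_id_py class_name out) := by unfold Spec_get_class_id_py; infer_instance

-- ===== CLAIM (what is proved, stated in full; the proofs are below) =====
def Claim_equal_get_class_id_py : Prop := ∀ (class_name : String), Dom_get_class_id_py class_name → Spec_get_class_id_py class_name (get_class_id_py class_name)

-- ===== LEMMAS AND PROOFS =====

/-- The 38-name class list A builds, as a literal. -/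
def pvClasses : List String :=
  ["1m","2m","3m","4m","5m","6m","7m","8m","9m",
   "1p","2p","3p","4p","5p","6p","7p","8p","9p",
   "1s","2s","3s","4s","5s","6s","7s","8s","9s",
   "1z","2z","3z","4z","5z","6z","7z",
   "0m","0p","0s","back"]

lemma get_class_id_py_eq_index (cn : String) :
    get_class_id_py cn =
      match PySem.List.index? pvClasses cn with
      | some i => (i : Int)
      | none => 0 := by
  have h : (["m", "p", "s"].foldl (fun acc suit =>
      (PySem.List.pyRange 1 10 1).foldl
        (fun acc num => acc ++ [PySem.Int.toStr num ++ suit]) acc) []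
      ++ ["1z", "2z", "3z", "4z", "5z", "6z", "7z"]
      ++ ["0m", "0p", "0s"] ++ ["back"]) = pvClasses := by decide
  simp only [get_class_id_py, h]

lemma alt_eq_zero_of_not_mem (cn : String) (h : cn ∉ pvClasses) :
    get_class_id_py_alt cn = 0 := by
  unfold get_class_id_py_alt
  have hback : cn ≠ "back" := by rintro rfl; exact h (by decide)
  rw [if_neg hback]
  have hmk : ∀ l : List Char, cn.toList = l → String.ofList l = cn := by
    intro l hl; apply String.toList_inj.mp; rw [← hl]; simp
  rcases hcl : cn.toList with _ | ⟨d, _ | ⟨s, _ | _⟩⟩ <;> try rfl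
  have hcn := hmk _ hcl
  show (if s ∈ ['m', 'p', 's'] then
        let suit_off : Int := if s = 'm' then 0 else if s = 'p' then 1 else 2
        if d = '0' then 34 + suit_off
        else if d ∈ ['1', '2', '3', '4', '5', '6', '7', '8', '9'] then
          suit_off * 9 + ((d.toNat : Int) - 48) - 1
        else 0
      else if s = 'z' ∧ d ∈ ['1', '2', '3', '4', '5', '6', '7'] then
        26 + ((d.toNat : Int) - 48)
      else 0) = 0
  by_cases h1 : s ∈ ['m', 'p', 's']
  · rw [if_pos h1]
    by_cases h2 : d = '0'
    · exfalso; apply h; subst h2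
      simp only [List.mem_cons, List.not_mem_nil, or_false] at h1
      rcases h1 with rfl | rfl | rfl <;> (rw [← hcn]; decide)
    · by_cases h3 : d ∈ ['1', '2', '3', '4', '5', '6', '7', '8', '9']
      · exfalso; apply h
        simp only [List.mem_cons, List.not_mem_nil, or_false] at h1 h3
        rcases h1 with rfl | rfl | rfl <;>
          rcases h3 with rfl | rfl | rfl | rfl | rfl | rfl | rfl | rfl | rfl <;>
          (rw [← hcn]; decide)
      · simp only [if_neg h2, if_neg h3]
  · rw [if_neg h1]
    by_cases h4 : s = 'z' ∧ d ∈ ['1', '2', '3', '4', '5', '6', '7']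
    · exfalso; apply h
      obtain ⟨rfl, hd⟩ := h4
      simp only [List.mem_cons, List.not_mem_nil, or_false] at hd
      rcases hd with rfl | rfl | rfl | rfl | rfl | rfl | rfl <;> (rw [← hcn]; decide)
    · rw [if_neg h4]

-- ===== VERDICT (by name: the statement is the Claim_ definition above) =====
theorem get_class_id_py_spec : Claim_equal_get_class_id_py := by
  intro cn _
  show get_class_id_py cn = get_class_id_py_alt cn
  rw [get_class_id_py_eq_index]
  by_cases h : cn ∈ pvClasses
  · fin_cases h <;> decide
  · rw [alt_eq_zero_of_not_mem cn h,
      (PySem.List.index?_eq_none_iff pvClasses cn).mpr h]
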